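-- pv_equiv track=rewrite | github.com/mwolfe03/ChemRiskPredict | sub_groups_from_smiles.py | grouping_bridges_dict
-- ===== SOURCE A (Python) =====
-- def grouping_bridges_dict(SMILES_string: str) -> dict:
--     """
--     Input: Smiles string
--     Output: list of the index BEFORE starting parens, and index AFTER after corresponding end parens
--     Ex Input: "Cc(c(o)ccccc)C"
--     Ex Output: {2: 12, 4: 6}
--     """
--     len_smiles_string = len(SMILES_string)
--     group_bridge_dict = {}
--     for i in range(len_smiles_string):
--         char = SMILES_string[i]
--
--         if char == "(":
--
--             paren_num = 1
--             start_paren_index = i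
--             for index in range(i + 1, len_smiles_string):
--                 current_char = SMILES_string[index]
--
--                 if current_char == "(":
--                     paren_num += 1
--                 elif current_char == ")":
--                     paren_num -= 1
--
--                 if paren_num == 0 and current_char == ")":
--                     end_paren_index = index
--                     group_bridge_dict[start_paren_index] = end_paren_index
--                     break
--
--     return group_bridge_dict
-- ===== SOURCE B (Python) =====
-- def grouping_bridges_dict(SMILES_string: str) -> dict:
--     stack = []
--     matches = {}
--     for i, ch in enumerate(SMILES_string):
--         if ch == "(":
--             stack.append(i)
--         elif ch == ")" and stack:
--             matches[stack.pop()] = i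
--     return dict(sorted(matches.items(), key=lambda kv: kv[0]))
-- ===== Notes on version B (the rewrite author's own statement) =====
-- stated objective: alternative
-- what changed: Replaced the per-open-paren inner rescan with a single pass keeping a stack of open-paren indices, recording each pair on pop and sorting by open index to restore A's insertion order.
import Mathlib
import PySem

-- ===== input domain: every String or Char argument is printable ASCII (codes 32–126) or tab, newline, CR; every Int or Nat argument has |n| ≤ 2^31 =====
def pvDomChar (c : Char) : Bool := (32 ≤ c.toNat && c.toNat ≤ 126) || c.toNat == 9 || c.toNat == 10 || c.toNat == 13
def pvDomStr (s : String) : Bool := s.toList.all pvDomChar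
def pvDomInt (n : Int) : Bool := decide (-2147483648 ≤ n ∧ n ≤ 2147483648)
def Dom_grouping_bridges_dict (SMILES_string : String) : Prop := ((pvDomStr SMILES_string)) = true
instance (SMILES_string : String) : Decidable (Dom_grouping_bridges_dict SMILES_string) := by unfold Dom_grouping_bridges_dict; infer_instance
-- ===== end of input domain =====

-- B replaces A's inner rescan per '(' with one pass over the string keeping a stack of
-- open-paren indices, then sorts the recorded pairs by open index (objective: alternative).


-- ===== PORT A =====
-- inner loop: `for index in range(i+1, n)` with paren_num updates and break on match
def pvFindClose : List Char → Int → Int → Option Int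
  | [], _, _ => none
  | c :: rest, idx, depth =>
      let d' := if c = '(' then depth + 1 else if c = ')' then depth - 1 else depth
      if d' = 0 ∧ c = ')' then some idx else pvFindClose rest (idx + 1) d'

-- outer loop: `for i in range(len_smiles_string)`; char = SMILES_string[i]
def pvOuterA : List Char → Int → PySem.Dict Int Int → PySem.Dict Int Int
  | [], _, d => d
  | c :: rest, i, d =>
      pvOuterA rest (i + 1)
        (if c = '(' then
          match pvFindClose rest (i + 1) 1 with
          | some j => d.insert i j
          | none => d
         else d)

def grouping_bridges_dict (SMILES_string : String) : List (Int × Int) :=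
  (pvOuterA SMILES_string.toList 0 PySem.Dict.empty).items

-- ===== PORT B =====
-- single pass over enumerate(s): push '(' indices, pop on ')' recording the pair
def pvAltLoop : List (Int × Char) → List Int → List (Int × Int) → List (Int × Int)
  | [], _, acc => acc
  | (i, c) :: rest, st, acc =>
      if c = '(' then pvAltLoop rest (i :: st) acc
      else if c = ')' then
        match st with
        | [] => pvAltLoop rest [] acc
        | t :: st' => pvAltLoop rest st' (acc ++ [(t, i)])
      else pvAltLoop rest st acc

def grouping_bridges_dict_alt (SMILES_string : String) : List (Int × Int) :=
  PySem.List.sorted (pvAltLoop (PySem.List.enumerate SMILES_string.toList 0) [] [])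
    (fun kv => kv.1) false

-- ===== PRECONDITION & SPEC =====
def Spec_grouping_bridges_dict (SMILES_string : String) (out : List (Int × Int)) : Prop := out = grouping_bridges_dict_alt SMILES_string
instance (SMILES_string : String) (out : List (Int × Int)) : Decidable (Spec_grouping_bridges_dict SMILES_string out) := by unfold Spec_grouping_bridges_dict; infer_instance

-- ===== CLAIM (what is proved, stated in full; the proofs are below) =====
def Claim_equal_grouping_bridges_dict : Prop := ∀ (SMILES_string : String), Dom_grouping_bridges_dict SMILES_string → Spec_grouping_bridges_dict SMILES_string (grouping_bridges_dict SMILES_string)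

-- ===== LEMMAS AND PROOFS =====

-- the common reference list: for every '(' at index i (in order), the pair (i, match of i)
def pvSpecList : List Char → Int → List (Int × Int)
  | [], _ => []
  | c :: rest, i =>
      (if c = '(' then ((pvFindClose rest (i + 1) 1).map (fun j => (i, j))).toList else [])
        ++ pvSpecList rest (i + 1)

-- pending matches of the stack entries: the entry at stack position m-1 is at inner depth m
def pvStackPairs (r : List Char) (p : Int) : List Int → Int → List (Int × Int)
  | [], _ => []
  | t :: st', m =>
      ((pvFindClose r p m).map (fun j => (t, j))).toList ++ pvStackPairs r p st' (m + 1)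

lemma pvFindClose_cons_open (rest : List Char) (p m : Int) :
    pvFindClose ('(' :: rest) p m = pvFindClose rest (p + 1) (m + 1) := by
  simp [pvFindClose]

lemma pvFindClose_cons_close (rest : List Char) (p m : Int) (hm : 2 ≤ m) :
    pvFindClose (')' :: rest) p m = pvFindClose rest (p + 1) (m - 1) := by
  simp [pvFindClose]
  omega

lemma pvFindClose_cons_other (c : Char) (rest : List Char) (p m : Int)
    (h1 : c ≠ '(') (h2 : c ≠ ')') :
    pvFindClose (c :: rest) p m = pvFindClose rest (p + 1) m := by
  simp [pvFindClose, h1, h2]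

lemma pvStackPairs_open (rest : List Char) (p : Int) :
    ∀ (st : List Int) (m : Int),
      pvStackPairs ('(' :: rest) p st m = pvStackPairs rest (p + 1) st (m + 1) := by
  intro st
  induction st with
  | nil => intro m; simp [pvStackPairs]
  | cons t st' ih =>
      intro m
      simp only [pvStackPairs, pvFindClose_cons_open rest p m]
      rw [ih (m + 1)]

lemma pvStackPairs_close (rest : List Char) (p : Int) :
    ∀ (st : List Int) (m : Int), 2 ≤ m →
      pvStackPairs (')' :: rest) p st m = pvStackPairs rest (p + 1) st (m - 1) := by
  intro st
  induction st with
  | nil => intro m _; simp [pvStackPairs]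
  | cons t st' ih =>
      intro m hm
      simp only [pvStackPairs, pvFindClose_cons_close rest p m hm]
      rw [ih (m + 1) (by omega)]
      congr 2
      omega

lemma pvStackPairs_other (c : Char) (rest : List Char) (p : Int)
    (h1 : c ≠ '(') (h2 : c ≠ ')') :
    ∀ (st : List Int) (m : Int),
      pvStackPairs (c :: rest) p st m = pvStackPairs rest (p + 1) st m := by
  intro st
  induction st with
  | nil => intro m; simp [pvStackPairs]
  | cons t st' ih =>
      intro m
      simp only [pvStackPairs, pvFindClose_cons_other c rest p m h1 h2]
      rw [ih (m + 1)]

lemma pvStackPairs_nil (p : Int) :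
    ∀ (st : List Int) (m : Int), pvStackPairs [] p st m = [] := by
  intro st
  induction st with
  | nil => intro m; simp [pvStackPairs]
  | cons t st' ih => intro m; simp [pvStackPairs, pvFindClose, ih]

lemma pvAltLoop_acc : ∀ (e : List (Int × Char)) (st : List Int) (acc : List (Int × Int)),
    pvAltLoop e st acc = acc ++ pvAltLoop e st [] := by
  intro e
  induction e with
  | nil => intro st acc; simp [pvAltLoop]
  | cons x rest ih =>
      intro st acc
      obtain ⟨i, c⟩ := x
      by_cases h1 : c = '('
      · simp only [pvAltLoop, if_pos h1]
        rw [ih (i :: st) acc]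
      · by_cases h2 : c = ')'
        · cases st with
          | nil =>
              simp only [pvAltLoop, if_neg h1, if_pos h2]
              rw [ih [] acc]
          | cons t st' =>
              simp only [pvAltLoop, if_neg h1, if_pos h2]
              rw [ih st' (acc ++ [(t, i)]), ih st' ([] ++ [(t, i)])]
              simp
        · simp only [pvAltLoop, if_neg h1, if_neg h2]
          rw [ih st acc]

-- main invariant: the pairs the stack pass will still produce are, up to order,
-- the pending matches of the current stack plus the matches of the opens in the suffix
lemma pvAlt_perm : ∀ (r : List Char) (p : Int) (st : List Int),
    (pvAltLoop (PySem.List.enumerate r p) st []).Perm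
      (pvStackPairs r p st 1 ++ pvSpecList r p) := by
  intro r
  induction r with
  | nil =>
      intro p st
      simp [PySem.List.enumerate_nil, pvAltLoop, pvSpecList, pvStackPairs_nil]
  | cons c rest ih =>
      intro p st
      rw [PySem.List.enumerate_cons]
      by_cases h1 : c = '('
      · subst h1
        simp only [pvAltLoop]
        refine (ih (p + 1) (p :: st)).trans ?_
        rw [pvStackPairs_open rest p st 1]
        simp only [pvStackPairs, pvSpecList]
        simpa [List.append_assoc] using
          (List.perm_append_comm
            (l₁ := ((pvFindClose rest (p + 1) 1).map (fun j => (p, j))).toList)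
            (l₂ := pvStackPairs rest (p + 1) st (1 + 1))).append_right
            (pvSpecList rest (p + 1))
      · by_cases h2 : c = ')'
        · subst h2
          cases st with
          | nil =>
              simp only [pvAltLoop, if_neg h1]
              simpa [pvStackPairs, pvSpecList, h1] using ih (p + 1) []
          | cons t st' =>
              simp only [pvAltLoop, if_neg h1]
              rw [List.nil_append, pvAltLoop_acc]
              have hhead : pvFindClose (')' :: rest) p 1 = some p := by
                simp [pvFindClose]
              have htail : pvStackPairs (')' :: rest) p st' (1 + 1) =
                  pvStackPairs rest (p + 1) st' 1 := by
                rw [pvStackPairs_close rest p st' (1 + 1) (by norm_num)]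
                norm_num
              simp only [pvStackPairs, pvSpecList, hhead, htail, if_neg h1]
              simpa using (ih (p + 1) st').append_left [(t, p)]
        · simp only [pvAltLoop, if_neg h1, if_neg h2]
          refine (ih (p + 1) st).trans ?_
          rw [pvStackPairs_other c rest p h1 h2 st 1]
          simp [pvSpecList, h1]

lemma pvSpecList_keys_ge : ∀ (r : List Char) (i : Int) (x : Int × Int),
    x ∈ pvSpecList r i → i ≤ x.1 := by
  intro r
  induction r with
  | nil => intro i x h; simp [pvSpecList] at h
  | cons c rest ih =>
      intro i x h
      simp only [pvSpecList, List.mem_append] at h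
      rcases h with h | h
      · split at h
        · cases hf : pvFindClose rest (i + 1) 1 with
          | none => simp [hf] at h
          | some j => simp [hf] at h; simp [h]
        · simp at h
      · have := ih (i + 1) x h; omega

lemma pvSpecList_pairwise : ∀ (r : List Char) (i : Int),
    (pvSpecList r i).Pairwise (fun a b => a.1 < b.1) := by
  intro r
  induction r with
  | nil => intro i; simp [pvSpecList]
  | cons c rest ih =>
      intro i
      simp only [pvSpecList]
      refine List.pairwise_append.mpr ⟨?_, ih (i + 1), ?_⟩
      · split
        · cases pvFindClose rest (i + 1) 1 <;> simp
        · simp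
      · intro a ha b hb
        have hb' := pvSpecList_keys_ge rest (i + 1) b hb
        split at ha
        · cases hf : pvFindClose rest (i + 1) 1 with
          | none => simp [hf] at ha
          | some j =>
              simp [hf] at ha
              simp [ha]
              omega
        · simp at ha

lemma pvOuterA_items : ∀ (r : List Char) (i : Int) (d : PySem.Dict Int Int),
    (∀ k ∈ d.keys, k < i) → d.keys.Nodup →
    (pvOuterA r i d).items = d.items ++ pvSpecList r i := by
  intro r
  induction r with
  | nil => intro i d _ _; simp [pvOuterA, pvSpecList]
  | cons c rest ih =>
      intro i d hlt hnd
      by_cases h1 : c = '('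
      · subst h1
        simp only [pvOuterA, pvSpecList, if_true]
        cases hf : pvFindClose rest (i + 1) 1 with
        | none =>
            rw [ih (i + 1) d (fun k hk => by have := hlt k hk; omega) hnd]
            simp
        | some j =>
            have hni : d.contains i = false := by
              cases hc : d.contains i with
              | false => rfl
              | true =>
                  exact absurd (hlt i ((PySem.Dict.contains_iff_mem_keys d i).mp hc))
                    (lt_irrefl i)
            rw [ih (i + 1) (d.insert i j) ?_ ?_]
            · rw [PySem.Dict.items_insert_of_not_contains d j hni]
              simp
            · intro k hk
              rw [PySem.Dict.mem_keys_insert] at hk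
              rcases hk with rfl | hk
              · omega
              · have := hlt k hk; omega
            · exact PySem.Dict.nodup_keys_insert d i j hnd
      · simp only [pvOuterA, pvSpecList, if_neg h1]
        rw [ih (i + 1) d (fun k hk => by have := hlt k hk; omega) hnd]
        simp

-- ===== VERDICT (by name: the statement is the Claim_ definition above) =====
theorem grouping_bridges_dict_spec : Claim_equal_grouping_bridges_dict := by
  intro s _
  unfold Spec_grouping_bridges_dict grouping_bridges_dict grouping_bridges_dict_alt
  have hA : (pvOuterA s.toList 0 PySem.Dict.empty).items = pvSpecList s.toList 0 := by
    rw [pvOuterA_items s.toList 0 PySem.Dict.empty (by simp [PySem.Dict.keys_empty])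
      (by simp [PySem.Dict.keys_empty])]
    simp [PySem.Dict.empty]
  have hperm := pvAlt_perm s.toList 0 []
  rw [show pvStackPairs s.toList 0 [] 1 = [] from rfl, List.nil_append] at hperm
  rw [hA]
  exact (PySem.List.sorted_eq_of_perm_of_pairwise_lt _ _ _ hperm.symm
    (pvSpecList_pairwise s.toList 0)).symm
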